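-- pv_equiv track=rewrite | github.com/Tardz/Laptop | qtile/config.py | modify_window_name
-- ===== SOURCE A (Python) =====
-- def modify_window_name(text):
--     parts = text.split('-')
--
--     cleaned_parts = [part.strip() for part in parts]
--
--     if len(cleaned_parts) >= 2:
--         if cleaned_parts[-1] == "Visual Studio Code":
--             return f"Code - {cleaned_parts[0]}"
--         return f"{cleaned_parts[-1]} - {cleaned_parts[0]}"
--     elif len(cleaned_parts) == 1:
--         return cleaned_parts[0]
--     else:
--         return ''
-- ===== SOURCE B (Python) =====
-- def modify_window_name(text):
--     seen = False
--     first_chars = []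
--     last_chars = []
--     for ch in text:
--         if ch == '-':
--             seen = True
--             last_chars = []
--         else:
--             if not seen:
--                 first_chars.append(ch)
--             last_chars.append(ch)
--     if not seen:
--         return text.strip()
--     first = ''.join(first_chars).strip()
--     last = ''.join(last_chars).strip()
--     if last == "Visual Studio Code":
--         return f"Code - {first}"
--     return f"{last} - {first}"
-- ===== Notes on version B (the rewrite author's own statement) =====
-- stated objective: alternative
-- what changed: B replaces A's split-into-all-parts-then-strip-each with a single left-to-right character pass that maintains only the before-first-hyphen and after-last-hyphen accumulators, then applies the same special case and formatting.
import Mathlib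
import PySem

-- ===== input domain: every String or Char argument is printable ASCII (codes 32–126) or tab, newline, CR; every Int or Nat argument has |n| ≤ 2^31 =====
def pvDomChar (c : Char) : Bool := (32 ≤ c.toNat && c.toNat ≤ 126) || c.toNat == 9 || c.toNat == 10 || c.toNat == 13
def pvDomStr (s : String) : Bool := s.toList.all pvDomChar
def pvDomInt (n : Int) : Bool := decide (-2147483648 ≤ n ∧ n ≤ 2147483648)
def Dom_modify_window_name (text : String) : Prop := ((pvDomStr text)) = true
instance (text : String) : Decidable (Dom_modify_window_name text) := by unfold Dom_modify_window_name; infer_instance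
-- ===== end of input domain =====

-- ===== PORT A =====
-- B replaces split-all-then-strip-all by a single character pass keeping only the
-- first- and last-segment accumulators; same return value, no speed claim.
def modify_window_name (text : String) : String :=
  let parts := (PySem.Str.split? text "-").getD []
  let cleaned_parts := parts.map PySem.Str.strip
  if cleaned_parts.length ≥ 2 then
    if (PySem.List.pyGet? cleaned_parts (-1)).getD "" = "Visual Studio Code" then
      "Code - " ++ (PySem.List.pyGet? cleaned_parts 0).getD ""
    else
      (PySem.List.pyGet? cleaned_parts (-1)).getD "" ++ " - " ++ (PySem.List.pyGet? cleaned_parts 0).getD ""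
  else if cleaned_parts.length = 1 then
    (PySem.List.pyGet? cleaned_parts 0).getD ""
  else
    ""

-- ===== PORT B =====
-- one step of Source B's loop; the Python appends, the port conses and reverses at the end
def pvStepB (st : Bool × List Char × List Char) (c : Char) : Bool × List Char × List Char :=
  if c = '-' then (true, st.2.1, [])
  else (st.1, if st.1 then st.2.1 else c :: st.2.1, c :: st.2.2)

def modify_window_name_alt (text : String) : String :=
  let st := text.toList.foldl pvStepB (false, [], [])
  if st.1 then
    let first := PySem.Str.strip (String.ofList st.2.1.reverse)
    let last := PySem.Str.strip (String.ofList st.2.2.reverse)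
    if last = "Visual Studio Code" then "Code - " ++ first
    else last ++ " - " ++ first
  else PySem.Str.strip text

-- ===== PRECONDITION & SPEC =====
def Spec_modify_window_name (text : String) (out : String) : Prop := out = modify_window_name_alt text
instance (text : String) (out : String) : Decidable (Spec_modify_window_name text out) := by unfold Spec_modify_window_name; infer_instance

-- ===== CLAIM (what is proved, stated in full; the proofs are below) =====
def Claim_equal_modify_window_name : Prop := ∀ (text : String), Dom_modify_window_name text → Spec_modify_window_name text (modify_window_name text)

-- ===== LEMMAS AND PROOFS =====

-- the non-hyphen predicate shared by the proof lemmas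
def pvKeep (c : Char) : Bool := !(c == '-')

-- reference split: Python's text.split('-') as a structural recursion
def pvSplit : List Char → List (List Char)
  | [] => [[]]
  | c :: rest =>
    if c = '-' then [] :: pvSplit rest
    else
      match pvSplit rest with
      | [] => [[c]]
      | p :: ps => (c :: p) :: ps



theorem pvSplit_ne_nil (s : List Char) : pvSplit s ≠ [] := by
  induction s with
  | nil => simp [pvSplit]
  | cons c rest ih =>
    simp only [pvSplit]
    split
    · simp
    · cases h : pvSplit rest <;> simp

theorem tw_app (l : List Char) (c : Char) :
    (l ++ [c]).takeWhile pvKeep =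
      if '-' ∈ l then l.takeWhile pvKeep else l ++ (if c = '-' then [] else [c]) := by
  induction l with
  | nil => by_cases hc : c = '-' <;> simp [List.takeWhile, pvKeep, hc]
  | cons a l ih =>
    by_cases ha : a = '-'
    · subst ha; simp [pvKeep]
    · rw [List.cons_append, List.takeWhile_cons, List.takeWhile_cons]
      have hk : pvKeep a = true := by simp [pvKeep, ha]
      rw [hk]
      simp only [if_true, ih]
      by_cases hm : '-' ∈ l <;> simp [hm, Ne.symm ha]

theorem tw_all (l : List Char) (h : '-' ∉ l) : l.takeWhile pvKeep = l := by
  apply List.takeWhile_eq_self_iff.mpr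
  intro x hx
  simp [pvKeep]
  exact fun hxe => h (hxe ▸ hx)

theorem pvSplit_headI (s : List Char) : (pvSplit s).headI = s.takeWhile pvKeep := by
  induction s with
  | nil => simp [pvSplit]
  | cons c rest ih =>
    by_cases hc : c = '-'
    · subst hc; simp [pvSplit, pvKeep]
    · rcases hne : pvSplit rest with _ | ⟨p, ps⟩
      · exact absurd hne (pvSplit_ne_nil rest)
      · rw [hne] at ih
        simp only [pvSplit, if_neg hc, hne, List.takeWhile_cons]
        have hk : pvKeep c = true := by simp [pvKeep, hc]
        rw [hk]
        simp only [if_true, List.headI]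
        simpa using ih

theorem pvSplit_length (s : List Char) : (pvSplit s).length = s.count '-' + 1 := by
  induction s with
  | nil => simp [pvSplit]
  | cons c rest ih =>
    by_cases hc : c = '-'
    · subst hc; simp [pvSplit, ih]
    · rcases hne : pvSplit rest with _ | ⟨p, ps⟩
      · exact absurd hne (pvSplit_ne_nil rest)
      · have h2 := ih; rw [hne] at h2
        simp only [pvSplit, if_neg hc, hne]
        rw [List.count_cons]
        simp [hc] at h2 ⊢
        omega

theorem pvSplit_getLast? (s : List Char) :
    (pvSplit s).getLast? = some ((s.reverse.takeWhile pvKeep).reverse) := by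
  induction s with
  | nil => simp [pvSplit]
  | cons c rest ih =>
    by_cases hc : c = '-'
    · subst hc
      have hsp : pvSplit ('-' :: rest) = [] :: pvSplit rest := by simp [pvSplit]
      have hgl : ([] :: pvSplit rest).getLast? = (pvSplit rest).getLast? := by
        rcases hne : pvSplit rest with _ | ⟨p, ps⟩
        · exact absurd hne (pvSplit_ne_nil rest)
        · simp
      rw [hsp, hgl, ih, List.reverse_cons, tw_app]
      by_cases hm : '-' ∈ rest.reverse
      · rw [if_pos hm]
      · rw [if_neg hm, if_pos rfl, List.append_nil, tw_all rest.reverse hm]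
    · rcases hne : pvSplit rest with _ | ⟨p, ps⟩
      · exact absurd hne (pvSplit_ne_nil rest)
      · rw [hne] at ih
        cases ps with
        | nil =>
          have hcnt := pvSplit_length rest
          rw [hne] at hcnt
          have hnm : '-' ∉ rest := by
            intro hm
            have := List.count_pos_iff.mpr hm
            simp at hcnt; omega
          have hnmr : '-' ∉ rest.reverse := by simpa using hnm
          have hp : p = rest := by
            rw [tw_all rest.reverse hnmr] at ih
            simpa using ih
          simp only [pvSplit, hne, List.reverse_cons, tw_app, if_neg hnmr, if_neg hc]
          simp [hp]
        | cons q qs =>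
          have hcnt := pvSplit_length rest
          rw [hne] at hcnt
          have hm : '-' ∈ rest := by
            by_contra hnm
            have : rest.count '-' = 0 := List.count_eq_zero.mpr (by simpa using hnm)
            simp [this] at hcnt
          have hmr : '-' ∈ rest.reverse := by simpa using hm
          simp only [pvSplit, if_neg hc, hne, List.getLast?_cons_cons,
            List.reverse_cons, tw_app, if_pos hmr]
          simpa using ih


theorem splitOn_go_eq (l : List Char) : ∀ (fuel : Nat), l.length ≤ fuel →
    ∀ (cur : List Char) (acc : List (List Char)),
    PySem.Chars.splitOn.go ['-'] fuel l cur acc =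
      acc.reverse ++ (cur.reverse ++ (pvSplit l).headI) :: (pvSplit l).tail := by
  induction l with
  | nil =>
    intro fuel _ cur acc
    cases fuel <;> simp [PySem.Chars.splitOn.go, pvSplit]
  | cons c rest ih =>
    intro fuel hf cur acc
    cases fuel with
    | zero => simp at hf
    | succ f =>
      by_cases hc : c = '-'
      · subst hc
        rw [show PySem.Chars.splitOn.go ['-'] (f+1) ('-'::rest) cur acc
             = PySem.Chars.splitOn.go ['-'] f rest [] (cur.reverse :: acc) by
            simp [PySem.Chars.splitOn.go]]
        rw [ih f (by simpa using hf) [] (cur.reverse :: acc)]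
        rcases hne : pvSplit rest with _ | ⟨p, ps⟩
        · exact absurd hne (pvSplit_ne_nil rest)
        · simp [pvSplit, hne]
      · rw [show PySem.Chars.splitOn.go ['-'] (f+1) (c::rest) cur acc
             = PySem.Chars.splitOn.go ['-'] f rest (c :: cur) acc by
            simp only [PySem.Chars.splitOn.go]
            simp only [List.isPrefixOf, Bool.and_true]
            rw [if_neg (by simpa using fun h => hc h.symm)]]
        rw [ih f (by simpa using hf) (c :: cur) acc]
        rcases hne : pvSplit rest with _ | ⟨p, ps⟩
        · exact absurd hne (pvSplit_ne_nil rest)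
        · simp [pvSplit, hc, hne]

theorem splitOn_eq (s : List Char) : PySem.Chars.splitOn s ['-'] = pvSplit s := by
  have h := splitOn_go_eq s (s.length + 1) (by omega) [] []
  rcases hne : pvSplit s with _ | ⟨p, ps⟩
  · exact absurd hne (pvSplit_ne_nil s)
  · simpa [PySem.Chars.splitOn, hne] using h

theorem foldB (s : List Char) : ∀ (seen : Bool) (fR lR : List Char),
    s.foldl pvStepB (seen, fR, lR) =
      ((seen || decide ('-' ∈ s)),
       (if seen then fR else (s.takeWhile pvKeep).reverse ++ fR),
       (if '-' ∈ s then s.reverse.takeWhile pvKeep else s.reverse ++ lR)) := by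
  induction s with
  | nil => intro seen fR lR; simp
  | cons c rest ih =>
    intro seen fR lR
    rw [List.foldl_cons]
    by_cases hc : c = '-'
    · subst hc
      have hstep : pvStepB (seen, fR, lR) '-' = (true, fR, []) := by simp [pvStepB]
      rw [hstep, ih true fR []]
      have htw : List.takeWhile pvKeep ('-' :: rest) = [] := by
        simp [pvKeep]
      rw [List.reverse_cons, tw_app]
      by_cases hm : '-' ∈ rest
      · simp [hm, htw, List.mem_reverse]
      · simp [hm, htw, List.mem_reverse]
    · have hstep : pvStepB (seen, fR, lR) c = (seen, if seen then fR else c :: fR, c :: lR) := by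
        simp [pvStepB, hc]
      rw [hstep, ih]
      have hk : pvKeep c = true := by simp [pvKeep, hc]
      rw [List.reverse_cons, tw_app, List.takeWhile_cons, hk]
      by_cases hm : '-' ∈ rest <;> cases seen <;>
        simp [hm, Ne.symm hc, List.mem_reverse]

-- ===== VERDICT (by name: the statement is the Claim_ definition above) =====
theorem modify_window_name_spec : Claim_equal_modify_window_name := by
  intro text _
  unfold Spec_modify_window_name modify_window_name modify_window_name_alt
  have hdash : "-".toList = ['-'] := by decide
  have hchars : PySem.Chars.split? text.toList "-".toList = some (pvSplit text.toList) := by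
    rw [hdash]
    simp [PySem.Chars.split?, splitOn_eq]
  obtain ⟨parts, hp⟩ : ∃ parts, PySem.Str.split? text "-" = some parts := by
    cases hsp : PySem.Str.split? text "-" with
    | none =>
      have := PySem.Str.split?_map text "-"
      rw [hsp, hchars] at this
      simp at this
    | some ps => exact ⟨ps, rfl⟩
  have hmap : parts.map String.toList = pvSplit text.toList := by
    have := PySem.Str.split?_map text "-"
    rw [hp, hchars] at this
    simpa using this
  rw [hp]
  simp only [Option.getD_some]
  have hclmap : (parts.map PySem.Str.strip).map String.toList
      = (pvSplit text.toList).map PySem.Chars.strip := by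
    rw [List.map_map, ← hmap, List.map_map]
    congr 1
    funext p
    simp [PySem.Str.toList_strip]
  have hlen : (parts.map PySem.Str.strip).length = text.toList.count '-' + 1 := by
    have := congrArg List.length hclmap
    simpa [pvSplit_length] using this
  rw [foldB text.toList false [] []]
  by_cases hm : '-' ∈ text.toList
  · have hcnt : 0 < text.toList.count '-' := List.count_pos_iff.mpr hm
    -- last and first elements of cleaned_parts
    have hglast : (parts.map PySem.Str.strip).getLast?
        = some (PySem.Str.strip (String.ofList (text.toList.reverse.takeWhile pvKeep).reverse)) := by
      have h1 : ((parts.map PySem.Str.strip).map String.toList).getLast?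
          = some (PySem.Chars.strip (text.toList.reverse.takeWhile pvKeep).reverse) := by
        rw [hclmap, List.getLast?_map, pvSplit_getLast?]
        rfl
      rw [List.getLast?_map] at h1
      cases h2 : (parts.map PySem.Str.strip).getLast? with
      | none => rw [h2] at h1; simp at h1
      | some L =>
        rw [h2] at h1
        simp only [Option.map_some, Option.some.injEq] at h1
        have : L = PySem.Str.strip (String.ofList (text.toList.reverse.takeWhile pvKeep).reverse) := by
          rw [← String.toList_inj, h1, PySem.Str.toList_strip]
          simp
        rw [this]
    have hhead : (parts.map PySem.Str.strip).head?
        = some (PySem.Str.strip (String.ofList (text.toList.takeWhile pvKeep))) := by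
      have h1 : ((parts.map PySem.Str.strip).map String.toList).head?
          = some (PySem.Chars.strip (text.toList.takeWhile pvKeep)) := by
        rw [hclmap, List.head?_map]
        rcases hne : pvSplit text.toList with _ | ⟨p, ps⟩
        · exact absurd hne (pvSplit_ne_nil text.toList)
        · have hh := pvSplit_headI text.toList
          rw [hne] at hh
          simp at hh
          simp [hh]
      rw [List.head?_map] at h1
      cases h2 : (parts.map PySem.Str.strip).head? with
      | none => rw [h2] at h1; simp at h1
      | some F =>
        rw [h2] at h1
        simp only [Option.map_some, Option.some.injEq] at h1
        have : F = PySem.Str.strip (String.ofList (text.toList.takeWhile pvKeep)) := by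
          rw [← String.toList_inj, h1, PySem.Str.toList_strip]
          simp
        rw [this]
    have hga : PySem.List.pyGet? (parts.map PySem.Str.strip) (-1)
        = (parts.map PySem.Str.strip).getLast? := by
      rw [PySem.List.pyGet?_neg_ofNat _ 1 (by omega) (by omega), List.getLast?_eq_getElem?]
    have hg0 : PySem.List.pyGet? (parts.map PySem.Str.strip) 0
        = (parts.map PySem.Str.strip).head? := by
      have := PySem.List.pyGet?_natCast (parts.map PySem.Str.strip) 0
      simpa [List.head?_eq_getElem?] using this
    rw [if_pos (by omega : (parts.map PySem.Str.strip).length ≥ 2), hga, hg0, hglast, hhead]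
    simp [hm]
  · have hcnt : text.toList.count '-' = 0 := List.count_eq_zero.mpr hm
    rw [if_neg (by omega : ¬ (parts.map PySem.Str.strip).length ≥ 2),
        if_pos (by omega : (parts.map PySem.Str.strip).length = 1)]
    have hg0 : PySem.List.pyGet? (parts.map PySem.Str.strip) 0
        = (parts.map PySem.Str.strip).head? := by
      have := PySem.List.pyGet?_natCast (parts.map PySem.Str.strip) 0
      simpa [List.head?_eq_getElem?] using this
    have hhead : (parts.map PySem.Str.strip).head? = some (PySem.Str.strip text) := by
      have h1 : ((parts.map PySem.Str.strip).map String.toList).head?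
          = some (PySem.Chars.strip text.toList) := by
        rw [hclmap, List.head?_map]
        rcases hne : pvSplit text.toList with _ | ⟨p, ps⟩
        · exact absurd hne (pvSplit_ne_nil text.toList)
        · have hh := pvSplit_headI text.toList
          rw [hne] at hh
          simp at hh
          rw [tw_all text.toList hm] at hh
          simp [hh]
      rw [List.head?_map] at h1
      cases h2 : (parts.map PySem.Str.strip).head? with
      | none => rw [h2] at h1; simp at h1
      | some F =>
        rw [h2] at h1
        simp only [Option.map_some, Option.some.injEq] at h1
        have : F = PySem.Str.strip text := by
          rw [← String.toList_inj, h1, PySem.Str.toList_strip]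
        rw [this]
    rw [hg0, hhead]
    simp [hm]
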